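-- pv_equiv track=rewrite | github.com/benClar/mscProject | translation_tool/.archive/Translator.py | bit_slice
-- ===== SOURCE A (Python) =====
-- def bit_slice(value, width):
--     output = []
--     output += [0] * width
--     for bit in reversed(range(width)):
--         for i, val in enumerate(value):
--             output[width - bit - 1] <<= 1
--             output[width - bit - 1] |= ((int(val) >> bit) & 0x1)
--     output = [str(i) for i in output]
--     return output
-- ===== SOURCE B (Python) =====
-- def bit_slice(value, width):
--     return [
--         str(sum(((int(v) >> (width - 1 - j)) & 0x1) << e
--                 for e, v in enumerate(reversed(value))))
--         for j in range(width)
--     ]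
-- ===== Notes on version B (the rewrite author's own statement) =====
-- stated objective: simpler
-- what changed: A interleaves all output positions through a mutable [0]*width list updated in place with shift-and-or inside a bit-major nested loop; B computes each output position independently as a sum of positioned bits over the reversed value list in one comprehension, with no mutable state or index arithmetic.
import Mathlib
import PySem

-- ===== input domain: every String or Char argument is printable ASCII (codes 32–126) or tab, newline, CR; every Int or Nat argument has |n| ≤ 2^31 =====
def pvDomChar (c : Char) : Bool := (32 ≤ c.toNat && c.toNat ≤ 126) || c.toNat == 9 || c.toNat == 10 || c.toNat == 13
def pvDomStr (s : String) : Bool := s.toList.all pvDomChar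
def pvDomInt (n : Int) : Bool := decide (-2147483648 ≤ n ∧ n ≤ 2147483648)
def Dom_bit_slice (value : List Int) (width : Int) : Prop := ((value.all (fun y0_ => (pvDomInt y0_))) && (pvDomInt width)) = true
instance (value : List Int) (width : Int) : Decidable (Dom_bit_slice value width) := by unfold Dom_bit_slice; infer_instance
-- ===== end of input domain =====

-- B computes each output position independently as a sum of positioned bits (one comprehension,
-- no mutable output list); same cost as A, but shorter and with no in-place index arithmetic.

-- ===== PORT A =====
def bit_slice (value : List Int) (width : Int) : List String :=
  -- output = []; output += [0] * width   ([0]*width is [] for width ≤ 0)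
  let output : List Int := List.replicate width.toNat 0
  -- for bit in reversed(range(width)): for i, val in enumerate(value): … (the index i is unused)
  let output := ((PySem.List.pyRange 0 width 1).reverse).foldl
    (fun out bit =>
      value.foldl (fun out val =>
        let idx := width - bit - 1
        -- output[idx] <<= 1   (0 ≤ idx < len(output) here, so .toNat / pyGetD are exact)
        let out := out.set idx.toNat ((PySem.List.pyGetD out idx 0) <<< (1 : Nat))
        -- output[idx] |= (int(val) >> bit) & 0x1   (int(val) = val on an int; 0 ≤ bit)
        out.set idx.toNat (PySem.Int.bor (PySem.List.pyGetD out idx 0)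
          (PySem.Int.band (val >>> bit.toNat) 1))) out) output
  output.map PySem.Int.toStr

-- ===== PORT B =====
def bit_slice_alt (value : List Int) (width : Int) : List String :=
  (PySem.List.pyRange 0 width 1).map (fun j =>
    PySem.Int.toStr
      (((PySem.List.enumerate value.reverse).map (fun (p : Int × Int) =>
          (PySem.Int.band (p.2 >>> (width - 1 - j).toNat) 1) <<< p.1.toNat)).sum))

-- ===== PRECONDITION & SPEC =====
def Spec_bit_slice (value : List Int) (width : Int) (out : List String) : Prop := out = bit_slice_alt value width
instance (value : List Int) (width : Int) (out : List String) : Decidable (Spec_bit_slice value width out) := by unfold Spec_bit_slice; infer_instance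

-- ===== CLAIM (what is proved, stated in full; the proofs are below) =====
def Claim_equal_bit_slice : Prop := ∀ (value : List Int) (width : Int), Dom_bit_slice value width → Spec_bit_slice value width (bit_slice value width)

-- ===== LEMMAS AND PROOFS =====

-- `a <<< 1` doubles
lemma shl_one (a : Int) : a <<< (1 : Nat) = 2 * a := by
  rw [Int.shiftLeft_eq]; ring

lemma shl_succ (a : Int) (s : Nat) : a <<< (s + 1) = 2 * (a <<< s) := by
  rw [Int.shiftLeft_eq, Int.shiftLeft_eq]; ring

-- `x & 1` is a bit
lemma band_one_cases (v : Int) : PySem.Int.band v 1 = 0 ∨ PySem.Int.band v 1 = 1 := by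
  rw [PySem.Int.band_one, PySem.Int.mod_eq_emod_of_pos (by norm_num)]
  omega

-- `(2a) | b = 2a + b` for a bit b
lemma bor_two_mul_bit (a b : Int) (hb : b = 0 ∨ b = 1) :
    PySem.Int.bor (2 * a) b = 2 * a + b := by
  rcases hb with rfl | rfl
  · simp [PySem.Int.bor_zero]
  · show PySem.Int.bor (2 * a) 1 = 2 * a + 1
    unfold PySem.Int.bor
    rcases (by omega : 0 ≤ a ∨ a < 0) with ha | ha
    · rw [if_pos (by omega), if_pos (by omega)]
      have h2 : (2 * a).toNat = 2 * a.toNat := by omega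
      have h1 : (1 : Int).toNat = 1 := rfl
      rw [h2, h1]
      have := Nat.lor_bit false a.toNat true 0
      simp [Nat.bit] at this
      rw [this]
      omega
    · rw [if_neg (by omega), if_pos (by omega)]
      have h1 : (1 : Int).toNat = 1 := rfl
      rw [h1, Nat.and_one_is_mod]
      omega

-- A's shift-then-or step written additively
lemma step_eq (b : Nat) :
    (fun (a v : Int) => PySem.Int.bor (a <<< (1 : Nat)) (PySem.Int.band (v >>> b) 1))
      = fun (a v : Int) => 2 * a + PySem.Int.band (v >>> b) 1 := by
  funext a v
  rw [shl_one, bor_two_mul_bit _ _ (band_one_cases _)]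

-- A's inner loop over `value` only rewrites the single cell idx
lemma foldlA_inner (value : List Int) (b : Nat) (idx : Int) :
    ∀ (out : List Int), 0 ≤ idx → idx.toNat < out.length →
    value.foldl (fun out val =>
        (out.set idx.toNat ((PySem.List.pyGetD out idx 0) <<< (1 : Nat))).set idx.toNat
          (PySem.Int.bor
            (PySem.List.pyGetD (out.set idx.toNat ((PySem.List.pyGetD out idx 0) <<< (1 : Nat))) idx 0)
            (PySem.Int.band (val >>> b) 1))) out
      = out.set idx.toNat
          (value.foldl (fun (a v : Int) => PySem.Int.bor (a <<< (1 : Nat)) (PySem.Int.band (v >>> b) 1))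
            (PySem.List.pyGetD out idx 0)) := by
  induction value with
  | nil =>
    intro out h0 hl
    simp only [List.foldl_nil]
    rw [PySem.List.pyGetD_of_nonneg _ _ h0, List.getD_eq_getElem _ _ hl, List.set_getElem_self]
  | cons v t ih =>
    intro out h0 hl
    simp only [List.foldl_cons]
    have hget : ∀ (x : Int), PySem.List.pyGetD (out.set idx.toNat x) idx 0 = x := by
      intro x
      rw [PySem.List.pyGetD_of_nonneg _ _ h0,
        List.getD_eq_getElem _ _ (by simpa using hl), List.getElem_set_self]
    rw [hget, List.set_set]
    rw [ih _ h0 (by simpa using hl), hget, List.set_set]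

-- the column value written at position j (A's inner fold as a function of the position)
def colF (value : List Int) (width : Int) (j : Nat) (a : Int) : Int :=
  value.foldl (fun (a v : Int) => PySem.Int.bor (a <<< (1 : Nat))
    (PySem.Int.band (v >>> (width - 1 - (j : Int)).toNat) 1)) a

-- A's outer loop is a fold of single-cell writes at indices (width-bit-1)
lemma outerA (value : List Int) (width : Int) :
    ∀ (bits : List Int) (out : List Int), out.length = width.toNat →
    (∀ b ∈ bits, 0 ≤ b ∧ b < width) →
    bits.foldl
      (fun out bit =>
        value.foldl (fun out val =>
          (out.set (width - bit - 1).toNat ((PySem.List.pyGetD out (width - bit - 1) 0) <<< (1 : Nat))).set (width - bit - 1).toNat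
            (PySem.Int.bor
              (PySem.List.pyGetD (out.set (width - bit - 1).toNat ((PySem.List.pyGetD out (width - bit - 1) 0) <<< (1 : Nat))) (width - bit - 1) 0)
              (PySem.Int.band (val >>> bit.toNat) 1))) out) out
      = (bits.map (fun b => (width - b - 1).toNat)).foldl
          (fun o j => o.set j (colF value width j (o.getD j 0))) out := by
  intro bits
  induction bits with
  | nil => intro out _ _; rfl
  | cons bit rest ih =>
    intro out hlen hmem
    obtain ⟨hb0, hbw⟩ := hmem bit (List.mem_cons_self ..)
    have h0 : (0:Int) ≤ width - bit - 1 := by omega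
    have hl : (width - bit - 1).toNat < out.length := by omega
    simp only [List.foldl_cons, List.map_cons]
    rw [foldlA_inner value bit.toNat _ out h0 hl]
    have hcol : colF value width (width - bit - 1).toNat (out.getD (width - bit - 1).toNat 0)
        = value.foldl (fun (a v : Int) => PySem.Int.bor (a <<< (1 : Nat)) (PySem.Int.band (v >>> bit.toNat) 1))
            (PySem.List.pyGetD out (width - bit - 1) 0) := by
      unfold colF
      rw [PySem.List.pyGetD_of_nonneg _ _ h0]
      have he : (((width - bit - 1).toNat : Nat) : Int) = width - bit - 1 := by omega
      rw [he]
      have h2 : width - 1 - (width - bit - 1) = bit := by ring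
      rw [h2]
    rw [← hcol]
    exact ih _ (by simpa using hlen) (fun b hb => hmem b (List.mem_cons_of_mem _ hb))

-- folding single-cell writes at distinct in-range indices
lemma foldl_set_nodup (F : Nat → Int → Int) :
    ∀ (js : List Nat) (out : List Int), js.Nodup → (∀ j ∈ js, j < out.length) →
    (js.foldl (fun o j => o.set j (F j (o.getD j 0))) out).length = out.length ∧
    ∀ k, (js.foldl (fun o j => o.set j (F j (o.getD j 0))) out).getD k 0
          = if k ∈ js then F k (out.getD k 0) else out.getD k 0 := by
  intro js
  induction js with
  | nil => intro out _ _; simp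
  | cons j rest ih =>
    intro out hnd hlt
    have hjl : j < out.length := hlt j (List.mem_cons_self ..)
    have hnd' := hnd.of_cons
    have hjr : j ∉ rest := (List.nodup_cons.mp hnd).1
    set o1 := out.set j (F j (out.getD j 0)) with ho1
    have hlen1 : o1.length = out.length := by simp [ho1]
    obtain ⟨ihlen, ihget⟩ := ih o1 hnd' (fun x hx => by rw [hlen1]; exact hlt x (List.mem_cons_of_mem _ hx))
    constructor
    · simp only [List.foldl_cons]; rw [ihlen, hlen1]
    · intro k
      simp only [List.foldl_cons]
      rw [ihget k]
      by_cases hk : k ∈ rest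
      · have : o1.getD k 0 = out.getD k 0 := by
          have hne : k ≠ j := fun h => hjr (h ▸ hk)
          by_cases hkl : k < out.length
          · rw [ho1, List.getD_eq_getElem _ _ (by simpa using hkl), List.getD_eq_getElem _ _ hkl,
              List.getElem_set_ne (by omega)]
          · rw [List.getD_eq_default _ _ (by rw [hlen1]; exact not_lt.mp hkl),
              List.getD_eq_default _ _ (not_lt.mp hkl)]
        rw [if_pos hk, if_pos (List.mem_cons_of_mem _ hk), this]
      · by_cases hkj : k = j
        · subst hkj
          simp only [hk, if_false, if_pos (List.mem_cons_self ..)]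
          rw [ho1, List.getD_eq_getElem _ _ (by simpa using hjl), List.getElem_set_self]
        · have hkc : k ∉ j :: rest := by simp [hkj, hk]
          simp only [hk, if_false, if_neg hkc]
          by_cases hkl : k < out.length
          · rw [ho1, List.getD_eq_getElem _ _ (by simpa using hkl), List.getD_eq_getElem _ _ hkl,
              List.getElem_set_ne (by omega)]
          · rw [List.getD_eq_default _ _ (by rw [hlen1]; exact not_lt.mp hkl),
              List.getD_eq_default _ _ (not_lt.mp hkl)]

-- A's write indices, in order, are exactly 0, 1, …, width-1
lemma indices_eq (width : Int) :
    ((PySem.List.pyRange 0 width 1).reverse.map (fun b => (width - b - 1).toNat))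
      = List.range width.toNat := by
  rw [PySem.List.pyRange_one]
  apply List.ext_getElem
  · simp
  · intro i h1 h2
    simp only [List.getElem_map, List.getElem_reverse, List.length_map, List.length_range,
      List.getElem_range]
    simp only [List.length_map, List.length_range] at h1 h2 ⊢
    have : (width - 0).toNat = width.toNat := by omega
    omega

-- a weighted-bit sum shifted up one position doubles
lemma wsum_succ (d : Int → Int) :
    ∀ (l : List Int) (s : Nat),
    ((PySem.List.enumerate l ((s : Int) + 1)).map (fun (p : Int × Int) => d p.2 <<< p.1.toNat)).sum
      = 2 * ((PySem.List.enumerate l (s : Int)).map (fun (p : Int × Int) => d p.2 <<< p.1.toNat)).sum := by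
  intro l
  induction l with
  | nil => intro s; simp [PySem.List.enumerate_nil]
  | cons x t ih =>
    intro s
    rw [PySem.List.enumerate_cons, PySem.List.enumerate_cons]
    simp only [List.map_cons, List.sum_cons]
    have h1 : ((s : Int) + 1).toNat = s + 1 := by omega
    have h2 : ((s : Int)).toNat = s := by omega
    have h3 : ((s : Int) + 1 + 1) = (((s+1 : Nat) : Int) + 1) := by push_cast; ring
    rw [h1, h2, h3, ih (s+1), shl_succ]
    rw [show (((s+1 : Nat)) : Int) = (s : Int) + 1 by push_cast; ring]
    ring

-- the MSB-first fold equals B's sum of positioned bits over the reversed list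
lemma foldl_eq_wsum (d : Int → Int) (l : List Int) :
    l.foldl (fun (a v : Int) => 2 * a + d v) 0
      = ((PySem.List.enumerate l.reverse).map (fun (p : Int × Int) => d p.2 <<< p.1.toNat)).sum := by
  induction l using List.reverseRecOn with
  | nil => simp [PySem.List.enumerate_nil]
  | append_singleton t x ih =>
    rw [List.foldl_append, List.foldl_cons, List.foldl_nil, List.reverse_append]
    simp only [List.reverse_singleton, List.singleton_append]
    rw [show (0:Int) = ((0:Nat):Int) by norm_num] at *
    rw [PySem.List.enumerate_cons]
    simp only [List.map_cons, List.sum_cons]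
    rw [wsum_succ d t.reverse 0, ← ih]
    simp [Int.shiftLeft_eq]
    ring

-- ===== VERDICT (by name: the statement is the Claim_ definition above) =====
theorem bit_slice_spec : Claim_equal_bit_slice := by
  intro value width _
  unfold Spec_bit_slice bit_slice bit_slice_alt
  dsimp only
  rw [outerA value width _ _ (by simp)
    (fun b hb => by
      rw [List.mem_reverse] at hb
      have := (PySem.List.mem_pyRange_one).mp hb
      omega)]
  rw [indices_eq]
  obtain ⟨hlen, hget⟩ := foldl_set_nodup (colF value width) (List.range width.toNat)
    (List.replicate width.toNat 0) (List.nodup_range)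
    (fun j hj => by simpa using List.mem_range.mp hj)
  have hres : (List.range width.toNat).foldl
        (fun o j => o.set j (colF value width j (o.getD j 0)))
        (List.replicate width.toNat 0)
      = (List.range width.toNat).map (fun k => colF value width k 0) := by
    apply List.ext_getElem
    · rw [hlen]; simp
    · intro i h1 h2
      rw [← List.getD_eq_getElem _ 0 h1, hget i]
      simp only [List.length_map, List.length_range] at h2
      rw [if_pos (List.mem_range.mpr h2), List.getD_replicate]
      · simp
      · exact h2
  rw [hres, List.map_map, PySem.List.pyRange_one, List.map_map]
  rw [show width - 0 = width from by ring]
  apply List.map_congr_left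
  intro k hk
  have hkw : k < width.toNat := List.mem_range.mp hk
  simp only [Function.comp]
  rw [zero_add]
  congr 1
  unfold colF
  rw [step_eq, foldl_eq_wsum (fun v => PySem.Int.band (v >>> (width - 1 - (k : Int)).toNat) 1)]
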